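-- pv_equiv track=rewrite | github.com/jmu0/cloud | printer.py | get_key_lengths
-- ===== SOURCE A (Python) =====
-- def get_key_lengths(keys, lst):
--     for item in lst:
--         for key in item:
--             if type(item[key]) == 'list':
--                 if key in keys:
--                     if keys[key] < len(str(len(item[key]))):
--                         keys[key] = len(str(len(item[key])))
--             else:
--                 if key in keys:
--                     if keys[key] < len(str(item[key])):
--                         keys[key] = len(str(item[key]))
--     return keys
-- ===== SOURCE B (Python) =====
-- def get_key_lengths(keys, lst):
--     # Stage 1: aggregate the data once into a fresh dict `best`, recording for
--     # EVERY key occurring in any item the maximum len(str(value)) seen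
--     # (no reference to `keys` during this scan).
--     best = {}
--     for item in lst:
--         for k, v in item.items():
--             l = len(str(v))
--             if k not in best or l > best[k]:
--                 best[k] = l
--     # Stage 2: one merge pass folding the aggregate into `keys` in place.
--     for k in keys:
--         if k in best and best[k] > keys[k]:
--             keys[k] = best[k]
--     return keys
-- ===== Notes on version B (the rewrite author's own statement) =====
-- stated objective: alternative
-- what changed: B is a two-stage algorithm: it first aggregates the whole data into a fresh dict of per-key maximum string lengths (scanning the items with no reference to `keys` at all), then merges that aggregate into `keys` in one pass; A interleaves lookup, comparison and in-place update of `keys` inside the per-field scan (and carries a dead `type(item[key]) == 'list'` branch that B drops).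
import Mathlib
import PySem

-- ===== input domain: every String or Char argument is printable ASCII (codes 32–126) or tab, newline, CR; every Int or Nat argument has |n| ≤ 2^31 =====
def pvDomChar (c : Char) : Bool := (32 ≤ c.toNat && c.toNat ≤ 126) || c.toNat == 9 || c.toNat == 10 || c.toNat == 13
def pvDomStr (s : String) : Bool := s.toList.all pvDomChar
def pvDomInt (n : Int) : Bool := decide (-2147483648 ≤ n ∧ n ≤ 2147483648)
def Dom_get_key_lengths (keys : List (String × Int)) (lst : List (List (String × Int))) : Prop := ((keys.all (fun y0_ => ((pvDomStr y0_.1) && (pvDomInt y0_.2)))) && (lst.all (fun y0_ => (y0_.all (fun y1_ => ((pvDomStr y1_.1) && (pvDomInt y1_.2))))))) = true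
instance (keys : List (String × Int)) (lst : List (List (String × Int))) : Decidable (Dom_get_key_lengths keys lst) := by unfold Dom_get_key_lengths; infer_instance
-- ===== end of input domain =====

-- B replaces A's interleaved scan-and-update with a two-stage algorithm (aggregate dict, then one
-- merge pass) and drops A's dead `type(item[key]) == 'list'` branch; in Python both mutate the keys
-- dict in place and return that same object — the equivalence proved here is about the returned value.


-- ===== PORT A =====
-- len(str(v)) for an int v (exact: PySem.Int.toChars is str(v))
def pvLenStr (v : Int) : Int := ((PySem.Int.toChars v).length : Int)

-- A's `if type(item[key]) == 'list':` compares a type object with the string 'list' and is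
-- always False (its then-branch could never run), so only the else branch is ported.
def get_key_lengths (keys : List (String × Int)) (lst : List (List (String × Int))) : List (String × Int) :=
  (lst.foldl (fun d item =>
      (PySem.Dict.mk item).keys.foldl (fun d key =>
        match d.get? key with
        | some cur =>
            let l := pvLenStr ((PySem.Dict.mk item).getD key 0)
            if cur < l then d.insert key l else d
        | none => d) d)
    (PySem.Dict.mk keys)).items

-- ===== PORT B =====
def get_key_lengths_alt (keys : List (String × Int)) (lst : List (List (String × Int))) : List (String × Int) :=
  -- stage 1: aggregate dict `best` over all items/fields, no reference to `keys`
  let best : PySem.Dict String Int := lst.foldl (fun b item =>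
      (PySem.Dict.mk item).items.foldl (fun b kv =>
        let l := pvLenStr kv.2
        -- `if k not in best or l > best[k]` (short-circuit) via the lookup
        match b.get? kv.1 with
        | none => b.insert kv.1 l
        | some a => if a < l then b.insert kv.1 l else b) b)
    PySem.Dict.empty
  -- stage 2: one merge pass into `keys`
  ((PySem.Dict.mk keys).keys.foldl (fun d k =>
      match best.get? k with
      | some m => if d.getD k 0 < m then d.insert k m else d
      | none => d) (PySem.Dict.mk keys)).items

-- ===== PRECONDITION & SPEC =====
-- Pre_ requires the association lists (the Lean encoding of the Python dicts) to have
-- pairwise-distinct keys: a Python dict cannot hold a duplicate key, so Pre_ excludes no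
-- input the Python function ever receives.
def Pre_get_key_lengths (keys : List (String × Int)) (lst : List (List (String × Int))) : Prop :=
  (keys.map Prod.fst).Nodup ∧ ∀ item ∈ lst, (item.map Prod.fst).Nodup
instance (keys : List (String × Int)) (lst : List (List (String × Int))) : Decidable (Pre_get_key_lengths keys lst) := by unfold Pre_get_key_lengths; infer_instance
def pvWitness_get_key_lengths : (List (String × Int)) × (List (List (String × Int))) :=
  ([("a", 1), ("b", 2)], [[("a", -55), ("c", 3)], [("b", 12345)]])

def Spec_get_key_lengths (keys : List (String × Int)) (lst : List (List (String × Int))) (out : List (String × Int)) : Prop := out = get_key_lengths_alt keys lst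
instance (keys : List (String × Int)) (lst : List (List (String × Int))) (out : List (String × Int)) : Decidable (Spec_get_key_lengths keys lst out) := by unfold Spec_get_key_lengths; infer_instance

-- ===== CLAIM (what is proved, stated in full; the proofs are below) =====
def Claim_equal_get_key_lengths : Prop := ∀ (keys : List (String × Int)) (lst : List (List (String × Int))), Dom_get_key_lengths keys lst → Pre_get_key_lengths keys lst → Spec_get_key_lengths keys lst (get_key_lengths keys lst)

-- ===== LEMMAS AND PROOFS =====

-- the effect of one item on the value tracked for key k (shared characterisation)
def pvF (k : String) (a : Int) (item : List (String × Int)) : Int :=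
  match (PySem.Dict.mk item).get? k with
  | some v => if a < pvLenStr v then pvLenStr v else a
  | none => a

---- A side ----

-- A's inner-loop body, named for the proofs (definitionally the lambda in the port)
def stepA (item : List (String × Int)) (d : PySem.Dict String Int) (key : String) : PySem.Dict String Int :=
  match d.get? key with
  | some cur =>
      let l := pvLenStr ((PySem.Dict.mk item).getD key 0)
      if cur < l then d.insert key l else d
  | none => d

lemma stepA_keys (item : List (String × Int)) (d : PySem.Dict String Int) (j : String) :
    (stepA item d j).keys = d.keys := by
  unfold stepA
  cases h : d.get? j with
  | none => rfl
  | some cur =>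
    simp only []
    split
    · exact PySem.Dict.keys_insert_of_contains _ _ (by rw [PySem.Dict.contains_eq_isSome_get?, h]; rfl)
    · rfl

lemma stepA_get?_ne (item : List (String × Int)) (d : PySem.Dict String Int) (j k : String)
    (h : k ≠ j) : (stepA item d j).get? k = d.get? k := by
  unfold stepA
  cases hj : d.get? j with
  | none => rfl
  | some cur =>
    simp only []
    split
    · exact PySem.Dict.get?_insert_of_ne _ _ h
    · rfl

lemma A_inner_get? (item : List (String × Int)) (ks : List String) (hk : ks.Nodup)
    (d : PySem.Dict String Int) (k : String) :
    (ks.foldl (stepA item) d).get? k =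
      if k ∈ ks then (d.get? k).map (fun a =>
        if a < pvLenStr ((PySem.Dict.mk item).getD k 0) then pvLenStr ((PySem.Dict.mk item).getD k 0) else a)
      else d.get? k := by
  induction ks generalizing d with
  | nil => simp
  | cons j ks ih =>
    rw [List.foldl_cons, ih hk.of_cons]
    by_cases hkj : k = j
    · subst hkj
      have hnot : k ∉ ks := (List.nodup_cons.mp hk).1
      rw [if_neg hnot, if_pos (List.mem_cons_self ..)]
      unfold stepA
      cases h : d.get? k with
      | none => simp [h]
      | some cur =>
        simp only [Option.map_some]
        split <;> simp [PySem.Dict.get?_insert_self, *]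
    · rw [stepA_get?_ne item d j k hkj]
      simp [List.mem_cons, hkj]

lemma A_inner_keys (item : List (String × Int)) (ks : List String) (d : PySem.Dict String Int) :
    (ks.foldl (stepA item) d).keys = d.keys := by
  induction ks generalizing d with
  | nil => rfl
  | cons j ks ih => rw [List.foldl_cons, ih, stepA_keys]

lemma A_item_get? (item : List (String × Int)) (hn : (item.map Prod.fst).Nodup)
    (d : PySem.Dict String Int) (k : String) :
    ((PySem.Dict.mk item).keys.foldl (stepA item) d).get? k =
      (d.get? k).map (fun a => pvF k a item) := by
  rw [A_inner_get? item _ (by simpa [PySem.Dict.keys_mk] using hn)]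
  by_cases hmem : k ∈ (PySem.Dict.mk item).keys
  · rw [if_pos hmem]
    have hc : (PySem.Dict.mk item).contains k = true :=
      (PySem.Dict.contains_iff_mem_keys _ _).mpr hmem
    rw [PySem.Dict.contains_eq_isSome_get?] at hc
    obtain ⟨v, hv⟩ := Option.isSome_iff_exists.mp hc
    have hd : (PySem.Dict.mk item).getD k 0 = v := PySem.Dict.getD_of_get?_eq_some _ _ hv
    unfold pvF
    rw [hd, hv]
  · rw [if_neg hmem]
    have hg : (PySem.Dict.mk item).get? k = none :=
      (PySem.Dict.get?_eq_none_iff_not_mem_keys _ _).mpr hmem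
    unfold pvF
    rw [hg]
    cases d.get? k <;> rfl

lemma A_outer_get? (lst : List (List (String × Int)))
    (hl : ∀ item ∈ lst, (item.map Prod.fst).Nodup)
    (d : PySem.Dict String Int) (k : String) :
    (lst.foldl (fun d item => (PySem.Dict.mk item).keys.foldl (stepA item) d) d).get? k =
      (d.get? k).map (fun a => lst.foldl (pvF k) a) := by
  induction lst generalizing d with
  | nil => cases h : d.get? k <;> simp [h]
  | cons item lst ih =>
    rw [List.foldl_cons, ih (fun i hi => hl i (List.mem_cons_of_mem _ hi)),
      A_item_get? item (hl item (List.mem_cons_self ..)), Option.map_map]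
    rfl

lemma A_outer_keys (lst : List (List (String × Int))) (d : PySem.Dict String Int) :
    (lst.foldl (fun d item => (PySem.Dict.mk item).keys.foldl (stepA item) d) d).keys = d.keys := by
  induction lst generalizing d with
  | nil => rfl
  | cons item lst ih => rw [List.foldl_cons, ih, A_inner_keys]

---- B side ----

-- running max of an optional accumulator
def optMax (o : Option Int) (l : Int) : Option Int :=
  match o with
  | none => some l
  | some a => if a < l then some l else o

-- effect of one item on `best.get? k`
def optStep (k : String) (o : Option Int) (item : List (String × Int)) : Option Int :=
  match (PySem.Dict.mk item).get? k with
  | some w => optMax o (pvLenStr w)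
  | none => o

-- merging the aggregate for k into the old value v
def mergeV (v : Int) (o : Option Int) : Int :=
  match o with
  | some m => if v < m then m else v
  | none => v

-- B's stage-1 inner body, named (definitionally the lambda in the port)
def stepM (b : PySem.Dict String Int) (kv : String × Int) : PySem.Dict String Int :=
  let l := pvLenStr kv.2
  match b.get? kv.1 with
  | none => b.insert kv.1 l
  | some a => if a < l then b.insert kv.1 l else b

lemma stepM_get?_ne (b : PySem.Dict String Int) (kv : String × Int) (k : String)
    (h : k ≠ kv.1) : (stepM b kv).get? k = b.get? k := by
  unfold stepM
  cases hb : b.get? kv.1 with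
  | none => exact PySem.Dict.get?_insert_of_ne _ _ h
  | some a =>
    simp only []
    split
    · exact PySem.Dict.get?_insert_of_ne _ _ h
    · rfl

lemma stepM_get?_self (b : PySem.Dict String Int) (kv : String × Int) :
    (stepM b kv).get? kv.1 = optMax (b.get? kv.1) (pvLenStr kv.2) := by
  unfold stepM optMax
  cases hb : b.get? kv.1 with
  | none => simp [PySem.Dict.get?_insert_self]
  | some a =>
    simp only []
    split <;> simp [PySem.Dict.get?_insert_self, hb]

lemma M_fold_get? (ps : List (String × Int)) (hn : (ps.map Prod.fst).Nodup)
    (b : PySem.Dict String Int) (k : String) :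
    (ps.foldl stepM b).get? k =
      match ps.find? (fun p => p.1 == k) with
      | some p => optMax (b.get? k) (pvLenStr p.2)
      | none => b.get? k := by
  induction ps generalizing b with
  | nil => rfl
  | cons p ps ih =>
    rw [List.foldl_cons, ih (by simpa using hn.of_cons)]
    by_cases hpk : p.1 = k
    · have hkN : k ∉ ps.map Prod.fst := by
        rw [List.map_cons] at hn
        have h1 := (List.nodup_cons.mp hn).1
        rw [hpk] at h1; exact h1
      have hfind : ps.find? (fun q => q.1 == k) = none := by
        rw [List.find?_eq_none]
        intro q hq hq2
        have hqk : q.1 = k := by simpa using hq2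
        exact hkN (by rw [← hqk]; exact List.mem_map_of_mem hq)
      rw [hfind]
      have : List.find? (fun q => q.1 == k) (p :: ps) = some p := by
        rw [List.find?_cons_of_pos]; simpa using hpk
      rw [this, ← hpk, stepM_get?_self]
    · have : List.find? (fun q => q.1 == k) (p :: ps) = List.find? (fun q => q.1 == k) ps := by
        rw [List.find?_cons_of_neg]; simpa using hpk
      rw [this, stepM_get?_ne b p k (fun h => hpk h.symm)]

-- find? over a nodup-key dict's items computes get?
lemma find?_items_eq_get? (d : PySem.Dict String Int) (hn : d.keys.Nodup) (k : String) :
    (match d.items.find? (fun p => p.1 == k) with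
      | some p => some p.2
      | none => (none : Option Int)) = d.get? k := by
  cases hf : d.items.find? (fun p => p.1 == k) with
  | some p =>
    obtain ⟨pk, pv⟩ := p
    have hk : pk = k := by simpa using List.find?_some hf
    subst hk
    have hmem := List.mem_of_find?_eq_some hf
    have hg := PySem.Dict.get?_of_mem_items d hmem hn
    simp [hg]
  | none =>
    have hnone : k ∉ d.keys := by
      intro hk
      simp only [PySem.Dict.keys] at hk
      obtain ⟨p, hp, hpk⟩ := List.mem_map.mp hk
      have := List.find?_eq_none.mp hf p hp
      simp [hpk] at this
    simp [(PySem.Dict.get?_eq_none_iff_not_mem_keys _ _).mpr hnone]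

lemma M_item_get? (item : List (String × Int)) (hn : (item.map Prod.fst).Nodup)
    (b : PySem.Dict String Int) (k : String) :
    ((PySem.Dict.mk item).items.foldl stepM b).get? k =
      optStep k (b.get? k) item := by
  have hnk : (PySem.Dict.mk item).keys.Nodup := by simpa [PySem.Dict.keys_mk] using hn
  have hnp : ((PySem.Dict.mk item).items.map Prod.fst).Nodup := by
    simpa [PySem.Dict.keys] using hnk
  rw [M_fold_get? _ hnp b k]
  have hfg := find?_items_eq_get? (PySem.Dict.mk item) hnk k
  unfold optStep
  cases hf : (PySem.Dict.mk item).items.find? (fun p => p.1 == k) with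
  | some p =>
    rw [hf] at hfg
    rw [← hfg]
  | none =>
    rw [hf] at hfg
    rw [← hfg]

lemma M_outer_get? (lst : List (List (String × Int)))
    (hl : ∀ item ∈ lst, (item.map Prod.fst).Nodup)
    (b : PySem.Dict String Int) (k : String) :
    (lst.foldl (fun b item => (PySem.Dict.mk item).items.foldl stepM b) b).get? k =
      lst.foldl (optStep k) (b.get? k) := by
  induction lst generalizing b with
  | nil => rfl
  | cons item lst ih =>
    rw [List.foldl_cons, List.foldl_cons,
      ih (fun i hi => hl i (List.mem_cons_of_mem _ hi)),
      M_item_get? item (hl item (List.mem_cons_self ..))]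

-- the bridge: A's running fold equals B's aggregate-then-merge, per key
@[simp] lemma mergeV_none (v : Int) : mergeV v none = v := rfl
@[simp] lemma mergeV_some (v m : Int) : mergeV v (some m) = if v < m then m else v := rfl

lemma pvF_mergeV (k : String) (v : Int) (o : Option Int) (item : List (String × Int)) :
    pvF k (mergeV v o) item = mergeV v (optStep k o item) := by
  unfold pvF optStep optMax
  cases (PySem.Dict.mk item).get? k with
  | none => rfl
  | some w =>
    cases o with
    | none => simp
    | some a =>
      show (if mergeV v (some a) < pvLenStr w then pvLenStr w else mergeV v (some a)) =
           mergeV v (if a < pvLenStr w then some (pvLenStr w) else some a)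
      by_cases hal : a < pvLenStr w
      · rw [if_pos hal]
        simp only [mergeV_some]
        split_ifs <;> omega
      · rw [if_neg hal]
        simp only [mergeV_some]
        split_ifs <;> omega

lemma fold_pvF_eq_mergeV (k : String) (lst : List (List (String × Int))) (v : Int) (o : Option Int) :
    lst.foldl (pvF k) (mergeV v o) = mergeV v (lst.foldl (optStep k) o) := by
  induction lst generalizing o with
  | nil => rfl
  | cons item lst ih =>
    rw [List.foldl_cons, List.foldl_cons, pvF_mergeV, ih]

-- B's stage-2 body, named (definitionally the lambda in the port)
def stepB (best : PySem.Dict String Int) (d : PySem.Dict String Int) (k : String) : PySem.Dict String Int :=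
  match best.get? k with
  | some m => if d.getD k 0 < m then d.insert k m else d
  | none => d

lemma stepB_get?_ne (best d : PySem.Dict String Int) (j k : String) (h : k ≠ j) :
    (stepB best d j).get? k = d.get? k := by
  unfold stepB
  cases best.get? j with
  | none => rfl
  | some m =>
    simp only []
    split
    · exact PySem.Dict.get?_insert_of_ne _ _ h
    · rfl

lemma B_merge_get? (best : PySem.Dict String Int) (ks : List String) (hk : ks.Nodup)
    (d : PySem.Dict String Int) (hsome : ∀ j ∈ ks, (d.get? j).isSome) (k : String) :
    (ks.foldl (stepB best) d).get? k =
      if k ∈ ks then (d.get? k).map (fun v => mergeV v (best.get? k)) else d.get? k := by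
  induction ks generalizing d with
  | nil => simp
  | cons j ks ih =>
    have hnotj : j ∉ ks := (List.nodup_cons.mp hk).1
    have hpres : ∀ j' ∈ ks, (stepB best d j).get? j' = d.get? j' := fun j' hj' =>
      stepB_get?_ne best d j j' (fun h => hnotj (h ▸ hj'))
    rw [List.foldl_cons, ih hk.of_cons _
      (fun j' hj' => (hpres j' hj') ▸ hsome j' (List.mem_cons_of_mem _ hj'))]
    by_cases hkj : k = j
    · subst hkj
      rw [if_neg hnotj, if_pos (List.mem_cons_self ..)]
      obtain ⟨v, hd⟩ := Option.isSome_iff_exists.mp (hsome k (List.mem_cons_self ..))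
      unfold stepB mergeV
      cases hb : best.get? k with
      | none => rw [hd]; rfl
      | some m =>
        simp only []
        rw [PySem.Dict.getD_of_get?_eq_some _ 0 hd, hd]
        by_cases hvm : v < m
        · rw [if_pos hvm, PySem.Dict.get?_insert_self]
          simp [hvm]
        · rw [if_neg hvm, hd]
          simp [hvm]
    · rw [stepB_get?_ne best d j k hkj]
      simp [List.mem_cons, hkj]

lemma stepB_keys (best d : PySem.Dict String Int) (j : String) (hj : j ∈ d.keys) :
    (stepB best d j).keys = d.keys := by
  unfold stepB
  cases best.get? j with
  | none => rfl
  | some m =>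
    simp only []
    split
    · exact PySem.Dict.keys_insert_of_contains _ _ ((PySem.Dict.contains_iff_mem_keys _ _).mpr hj)
    · rfl

lemma B_merge_keys (best : PySem.Dict String Int) (ks : List String) (d : PySem.Dict String Int)
    (h : ∀ j ∈ ks, j ∈ d.keys) : (ks.foldl (stepB best) d).keys = d.keys := by
  induction ks generalizing d with
  | nil => rfl
  | cons j ks ih =>
    have hk : (stepB best d j).keys = d.keys := stepB_keys best d j (h j (List.mem_cons_self ..))
    rw [List.foldl_cons, ih _ (fun j' hj' => hk ▸ h j' (List.mem_cons_of_mem _ hj')), hk]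

lemma ports_items_eq (keys : List (String × Int)) (lst : List (List (String × Int)))
    (hn : (keys.map Prod.fst).Nodup) (hl : ∀ item ∈ lst, (item.map Prod.fst).Nodup) :
    get_key_lengths keys lst = get_key_lengths_alt keys lst := by
  show (lst.foldl (fun d item => (PySem.Dict.mk item).keys.foldl (stepA item) d) (PySem.Dict.mk keys)).items =
    ((PySem.Dict.mk keys).keys.foldl
      (stepB (lst.foldl (fun b item => (PySem.Dict.mk item).items.foldl stepM b) PySem.Dict.empty))
      (PySem.Dict.mk keys)).items
  set d0 : PySem.Dict String Int := PySem.Dict.mk keys with hd0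
  set best := lst.foldl (fun b item => (PySem.Dict.mk item).items.foldl stepM b) PySem.Dict.empty with hbest
  have hnk : d0.keys.Nodup := by
    rw [hd0, PySem.Dict.keys_mk]; exact hn
  set Ares := lst.foldl (fun d item => (PySem.Dict.mk item).keys.foldl (stepA item) d) d0 with hAres
  set Bres := d0.keys.foldl (stepB best) d0 with hBres
  have hAk : Ares.keys = d0.keys := A_outer_keys lst d0
  have hBk : Bres.keys = d0.keys := B_merge_keys best d0.keys d0 (fun j hj => hj)
  have hsome : ∀ j ∈ d0.keys, (d0.get? j).isSome := fun j hj => by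
    rw [← PySem.Dict.contains_eq_isSome_get?]
    exact (PySem.Dict.contains_iff_mem_keys _ _).mpr hj
  rw [PySem.Dict.items_eq_map_keys Ares (hAk ▸ hnk) 0,
      PySem.Dict.items_eq_map_keys Bres (hBk ▸ hnk) 0, hAk, hBk]
  refine List.map_congr_left ?_
  intro k hk
  have hc : (d0.get? k).isSome := by
    rw [← PySem.Dict.contains_eq_isSome_get?]
    exact (PySem.Dict.contains_iff_mem_keys _ _).mpr hk
  obtain ⟨v, hv⟩ := Option.isSome_iff_exists.mp hc
  have hbg : best.get? k = lst.foldl (optStep k) none := by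
    rw [hbest, M_outer_get? lst hl PySem.Dict.empty k, PySem.Dict.get?_empty]
  have hA : Ares.get? k = some (lst.foldl (pvF k) v) := by
    rw [hAres, A_outer_get? lst hl d0 k, hv]; rfl
  have hB : Bres.get? k = some (mergeV v (best.get? k)) := by
    rw [hBres, B_merge_get? best d0.keys hnk d0 hsome k, if_pos hk, hv]; rfl
  have hval : lst.foldl (pvF k) v = mergeV v (best.get? k) := by
    rw [hbg, ← fold_pvF_eq_mergeV k lst v none]; rfl
  rw [PySem.Dict.getD_of_get?_eq_some _ 0 hA, PySem.Dict.getD_of_get?_eq_some _ 0 hB, hval]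

-- ===== VERDICT (by name: the statement is the Claim_ definition above) =====
theorem get_key_lengths_spec : Claim_equal_get_key_lengths := by
  intro keys lst _ hpre
  show get_key_lengths keys lst = get_key_lengths_alt keys lst
  exact ports_items_eq keys lst hpre.1 hpre.2
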